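-- pv_equiv track=rewrite | github.com/DanielQuelali/catan-monorepo | scripts/analyze_holdout_pair_regret.py | port_flags_for_pair
-- ===== SOURCE A (Python) =====
-- from typing import Any
--
-- PORT_NODE_PAIRS: list[tuple[int, int]] = [
--     (25, 26),
--     (28, 29),
--     (32, 33),
--     (35, 36),
--     (38, 39),
--     (40, 44),
--     (45, 47),
--     (48, 49),
--     (52, 53),
-- ]
--
-- def port_flags_for_pair(
--     board: dict[str, Any],
--     settlement_a: int,
--     settlement_b: int,
-- ) -> dict[str, int]:
--     flags = {
--         "3to1": 0,
--         "wood": 0,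
--         "brick": 0,
--         "sheep": 0,
--         "wheat": 0,
--         "ore": 0,
--     }
--     port_resources = board.get("port_resources", [])
--     settlements = {settlement_a, settlement_b}
--     for idx, node_pair in enumerate(PORT_NODE_PAIRS):
--         if node_pair[0] not in settlements and node_pair[1] not in settlements:
--             continue
--         port = port_resources[idx] if idx < len(port_resources) else None
--         if port is None:
--             flags["3to1"] = 1
--             continue
--         label = str(port).strip().upper()
--         if label == "WOOD":
--             flags["wood"] = 1
--         elif label == "BRICK":
--             flags["brick"] = 1
--         elif label == "SHEEP":
--             flags["sheep"] = 1
--         elif label == "WHEAT":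
--             flags["wheat"] = 1
--         elif label == "ORE":
--             flags["ore"] = 1
--     return flags
-- ===== SOURCE B (Python) =====
-- PORT_NODE_PAIRS: list[tuple[int, int]] = [
--     (25, 26),
--     (28, 29),
--     (32, 33),
--     (35, 36),
--     (38, 39),
--     (40, 44),
--     (45, 47),
--     (48, 49),
--     (52, 53),
-- ]
--
-- _NODE_TO_PORT_IDX: dict[int, int] = {
--     n: i for i, pair in enumerate(PORT_NODE_PAIRS) for n in pair
-- }
--
-- def port_flags_for_pair(board, settlement_a, settlement_b):
--     flags = {
--         "3to1": 0,
--         "wood": 0,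
--         "brick": 0,
--         "sheep": 0,
--         "wheat": 0,
--         "ore": 0,
--     }
--     port_resources = board.get("port_resources", [])
--     nodes = [settlement_a] if settlement_a == settlement_b else [settlement_a, settlement_b]
--     for node in nodes:
--         idx = _NODE_TO_PORT_IDX.get(node)
--         if idx is None:
--             continue
--         port = port_resources[idx] if idx < len(port_resources) else None
--         if port is None:
--             flags["3to1"] = 1
--             continue
--         label = str(port).strip().upper()
--         if label == "WOOD":
--             flags["wood"] = 1
--         elif label == "BRICK":
--             flags["brick"] = 1
--         elif label == "SHEEP":
--             flags["sheep"] = 1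
--         elif label == "WHEAT":
--             flags["wheat"] = 1
--         elif label == "ORE":
--             flags["ore"] = 1
--     return flags
-- ===== Notes on version B (the rewrite author's own statement) =====
-- stated objective: alternative
-- what changed: B inverts the data: a precomputed node->port-index map replaces A's scan over all nine port pairs, so the loop runs over the (at most two) settlement nodes instead of over every port pair.
import Mathlib
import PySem

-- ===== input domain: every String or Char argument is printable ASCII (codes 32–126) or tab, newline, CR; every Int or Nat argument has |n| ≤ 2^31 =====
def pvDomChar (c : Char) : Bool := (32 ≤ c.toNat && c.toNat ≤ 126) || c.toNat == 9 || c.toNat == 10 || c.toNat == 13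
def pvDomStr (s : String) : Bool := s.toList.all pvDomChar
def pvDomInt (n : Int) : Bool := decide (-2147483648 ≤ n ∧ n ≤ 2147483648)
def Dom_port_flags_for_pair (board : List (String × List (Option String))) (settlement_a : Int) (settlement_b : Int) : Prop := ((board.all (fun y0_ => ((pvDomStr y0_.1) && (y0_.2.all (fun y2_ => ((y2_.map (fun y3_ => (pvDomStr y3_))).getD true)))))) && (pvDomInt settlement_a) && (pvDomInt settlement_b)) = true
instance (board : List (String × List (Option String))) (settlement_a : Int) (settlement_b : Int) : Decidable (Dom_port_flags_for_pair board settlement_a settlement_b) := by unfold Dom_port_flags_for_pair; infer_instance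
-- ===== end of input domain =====

-- B replaces A's scan over all nine port pairs by a node->index map consulted for the two
-- settlement nodes only (objective: alternative decomposition; same output everywhere).

-- ===== PORT A =====
def PORT_NODE_PAIRS : List (Int × Int) :=
  [(25, 26), (28, 29), (32, 33), (35, 36), (38, 39), (40, 44), (45, 47), (48, 49), (52, 53)]

-- the initial flags dict (shared literal of both Pythons)
def initFlags : PySem.Dict String Int :=
  PySem.Dict.mk [("3to1", 0), ("wood", 0), ("brick", 0), ("sheep", 0), ("wheat", 0), ("ore", 0)]

-- 'port_resources[idx] if idx < len(port_resources) else None' followed by the label handling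
def handlePort (pr : List (Option String)) (idx : Nat) (flags : PySem.Dict String Int) :
    PySem.Dict String Int :=
  let port : Option String := if idx < pr.length then pr.getD idx none else none
  match port with
  | none => flags.insert "3to1" 1
  | some p =>
    let label := PySem.Str.upper (PySem.Str.strip p)
    if label = "WOOD" then flags.insert "wood" 1
    else if label = "BRICK" then flags.insert "brick" 1
    else if label = "SHEEP" then flags.insert "sheep" 1
    else if label = "WHEAT" then flags.insert "wheat" 1
    else if label = "ORE" then flags.insert "ore" 1
    else flags

def port_flags_for_pair (board : List (String × List (Option String))) (settlement_a : Int) (settlement_b : Int) : List (String × Int) :=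
  let port_resources := PySem.Dict.getD (PySem.Dict.mk board) "port_resources" []
  let settlements : PySem.Set Int := PySem.Set.ofList [settlement_a, settlement_b]
  (PySem.List.enumerate PORT_NODE_PAIRS).foldl
    (fun flags x =>
      if !(PySem.Set.contains settlements x.2.1) && !(PySem.Set.contains settlements x.2.2) then
        flags
      else
        handlePort port_resources x.1.toNat flags)
    initFlags |>.items

-- ===== PORT B =====
-- _NODE_TO_PORT_IDX = {n: i for i, pair in enumerate(PORT_NODE_PAIRS) for n in pair}
def NODE_TO_PORT_IDX : PySem.Dict Int Int :=
  PySem.Dict.mk [(25, 0), (26, 0), (28, 1), (29, 1), (32, 2), (33, 2), (35, 3), (36, 3), (38, 4), (39, 4),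
   (40, 5), (44, 5), (45, 6), (47, 6), (48, 7), (49, 7), (52, 8), (53, 8)]

def port_flags_for_pair_alt (board : List (String × List (Option String))) (settlement_a : Int) (settlement_b : Int) : List (String × Int) :=
  let port_resources := PySem.Dict.getD (PySem.Dict.mk board) "port_resources" []
  let nodes : List Int :=
    if settlement_a = settlement_b then [settlement_a] else [settlement_a, settlement_b]
  nodes.foldl
    (fun flags node =>
      match PySem.Dict.get? NODE_TO_PORT_IDX node with
      | none => flags
      | some idx => handlePort port_resources idx.toNat flags)
    initFlags |>.items

-- ===== PRECONDITION & SPEC =====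
def Spec_port_flags_for_pair (board : List (String × List (Option String))) (settlement_a : Int) (settlement_b : Int) (out : List (String × Int)) : Prop := out = port_flags_for_pair_alt board settlement_a settlement_b
instance (board : List (String × List (Option String))) (settlement_a : Int) (settlement_b : Int) (out : List (String × Int)) : Decidable (Spec_port_flags_for_pair board settlement_a settlement_b out) := by unfold Spec_port_flags_for_pair; infer_instance

-- ===== CLAIM (what is proved, stated in full; the proofs are below) =====
def Claim_equal_port_flags_for_pair : Prop := ∀ (board : List (String × List (Option String))) (settlement_a : Int) (settlement_b : Int), Dom_port_flags_for_pair board settlement_a settlement_b → Spec_port_flags_for_pair board settlement_a settlement_b (port_flags_for_pair board settlement_a settlement_b)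

-- ===== LEMMAS AND PROOFS =====

-- canonical flag dict from six booleans
def canon (b1 b2 b3 b4 b5 b6 : Bool) : PySem.Dict String Int :=
  PySem.Dict.mk [("3to1", if b1 then 1 else 0), ("wood", if b2 then 1 else 0), ("brick", if b3 then 1 else 0),
   ("sheep", if b4 then 1 else 0), ("wheat", if b5 then 1 else 0), ("ore", if b6 then 1 else 0)]

-- per-index trigger conditions
def pAt (pr : List (Option String)) (i : Nat) : Option String :=
  if i < pr.length then pr.getD i none else none

def trig (pr : List (Option String)) (i : Nat) (r : String) : Bool :=
  match pAt pr i with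
  | none => false
  | some p => PySem.Str.upper (PySem.Str.strip p) == r

def trigN (pr : List (Option String)) (i : Nat) : Bool := (pAt pr i).isNone

theorem handlePort_canon (pr : List (Option String)) (i : Nat) (b1 b2 b3 b4 b5 b6 : Bool) :
    handlePort pr i (canon b1 b2 b3 b4 b5 b6) =
      canon (b1 || trigN pr i) (b2 || trig pr i "WOOD") (b3 || trig pr i "BRICK")
        (b4 || trig pr i "SHEEP") (b5 || trig pr i "WHEAT") (b6 || trig pr i "ORE") := by
  unfold handlePort trig trigN pAt
  cases h : (if i < pr.length then pr.getD i none else none) with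
  | none => cases b1 <;> simp [canon, PySem.Dict.insert]
  | some p =>
    simp only [Option.isNone_some, Bool.or_false]
    split_ifs with h1 h2 h3 h4 h5 <;>
      simp_all [canon, PySem.Dict.insert, beq_iff_eq]

-- folding any hit-index list over canon accumulates the triggers with `any`
theorem foldl_handle_canon (pr : List (Option String)) (step : α → Option Nat)
    (L : List α) (b1 b2 b3 b4 b5 b6 : Bool) :
    L.foldl (fun flags x =>
        match step x with
        | none => flags
        | some i => handlePort pr i flags) (canon b1 b2 b3 b4 b5 b6) =
      canon (b1 || L.any (fun x => ((step x).map (trigN pr)).getD false))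
        (b2 || L.any (fun x => ((step x).map (fun i => trig pr i "WOOD")).getD false))
        (b3 || L.any (fun x => ((step x).map (fun i => trig pr i "BRICK")).getD false))
        (b4 || L.any (fun x => ((step x).map (fun i => trig pr i "SHEEP")).getD false))
        (b5 || L.any (fun x => ((step x).map (fun i => trig pr i "WHEAT")).getD false))
        (b6 || L.any (fun x => ((step x).map (fun i => trig pr i "ORE")).getD false)) := by
  induction L generalizing b1 b2 b3 b4 b5 b6 with
  | nil => simp
  | cons x xs ih =>
    simp only [List.foldl_cons, List.any_cons]
    cases hx : step x with
    | none => simp only [ih]; simp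
    | some i => simp only [handlePort_canon, ih]; simp [Bool.or_assoc]

-- A's per-pair step as a `step` function
def stepA (a b : Int) (x : Int × (Int × Int)) : Option Nat :=
  if !(PySem.Set.contains (PySem.Set.ofList [a, b]) x.2.1)
      && !(PySem.Set.contains (PySem.Set.ofList [a, b]) x.2.2) then none
  else some x.1.toNat

def stepB (n : Int) : Option Nat := (PySem.Dict.get? NODE_TO_PORT_IDX n).map Int.toNat

theorem portA_eq_fold (board : List (String × List (Option String))) (a b : Int) :
    port_flags_for_pair board a b =
      ((PySem.List.enumerate PORT_NODE_PAIRS).foldl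
        (fun flags x =>
          match stepA a b x with
          | none => flags
          | some i => handlePort (PySem.Dict.getD (PySem.Dict.mk board) "port_resources" []) i flags) initFlags).items := by
  simp only [port_flags_for_pair, stepA]
  congr 1
  apply List.foldl_ext
  intro acc x hx
  split <;> simp

theorem portB_eq_fold (board : List (String × List (Option String))) (a b : Int) :
    port_flags_for_pair_alt board a b =
      ((if a = b then [a] else [a, b]).foldl
        (fun flags n =>
          match stepB n with
          | none => flags
          | some i => handlePort (PySem.Dict.getD (PySem.Dict.mk board) "port_resources" []) i flags) initFlags).items := by
  simp only [port_flags_for_pair_alt, stepB]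
  congr 1
  apply List.foldl_ext
  intro acc n hn
  cases h : PySem.Dict.get? NODE_TO_PORT_IDX n <;> simp

-- single-node form of A's per-pair condition
def stepA1 (c : Int) (x : Int × (Int × Int)) : Option Nat :=
  if x.2.1 == c || x.2.2 == c then some x.1.toNat else none

theorem any_or_split {α : Type} (l : List α) (p q : α → Bool) :
    l.any (fun x => p x || q x) = (l.any p || l.any q) := by
  induction l with
  | nil => simp
  | cons x xs ih => simp [ih, Bool.or_assoc, Bool.or_left_comm]

theorem contains_ofList_pair (a b x : Int) :
    PySem.Set.contains (PySem.Set.ofList [a, b]) x = (x == a || x == b) := by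
  rw [Bool.eq_iff_iff]
  simp [PySem.Set.mem_ofList, beq_iff_eq]

theorem stepA_split (a b : Int) (g : Nat → Bool) (x : Int × (Int × Int)) :
    ((stepA a b x).map g).getD false =
      (((stepA1 a x).map g).getD false || ((stepA1 b x).map g).getD false) := by
  unfold stepA stepA1
  simp only [contains_ofList_pair]
  by_cases h1 : x.2.1 = a <;> by_cases h2 : x.2.1 = b <;> by_cases h3 : x.2.2 = a <;>
    by_cases h4 : x.2.2 = b <;> simp [h1, h2, h3, h4] <;> (try (split_ifs <;> simp_all))

def ALL_PORT_NODES : List Int := [25, 26, 28, 29, 32, 33, 35, 36, 38, 39, 40, 44, 45, 47, 48, 49, 52, 53]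

theorem single_node (c : Int) (g : Nat → Bool) :
    (PySem.List.enumerate PORT_NODE_PAIRS).any (fun x => ((stepA1 c x).map g).getD false) =
      ((stepB c).map g).getD false := by
  by_cases h : c ∈ ALL_PORT_NODES
  · fin_cases h <;>
      simp [stepA1, stepB, PORT_NODE_PAIRS, NODE_TO_PORT_IDX, PySem.List.enumerate,
        PySem.Dict.get?]
  · simp only [ALL_PORT_NODES, List.mem_cons, List.not_mem_nil, or_false, not_or] at h
    obtain ⟨n1, n2, n3, n4, n5, n6, n7, n8, n9, n10, n11, n12, n13, n14, n15, n16, n17, n18⟩ := h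
    simp [stepA1, stepB, PORT_NODE_PAIRS, NODE_TO_PORT_IDX, PySem.List.enumerate,
      PySem.Dict.get?, beq_iff_eq, Ne.symm n1, Ne.symm n2, Ne.symm n3, Ne.symm n4, Ne.symm n5,
      Ne.symm n6, Ne.symm n7, Ne.symm n8, Ne.symm n9, Ne.symm n10, Ne.symm n11, Ne.symm n12,
      Ne.symm n13, Ne.symm n14, Ne.symm n15, Ne.symm n16, Ne.symm n17, Ne.symm n18]

-- the key combinatorial fact: per trigger function g, A's any over pairs = B's any over nodes
theorem any_pairs_eq (a b : Int) (g : Nat → Bool) :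
    (PySem.List.enumerate PORT_NODE_PAIRS).any
        (fun x => ((stepA a b x).map g).getD false) =
      ((if a = b then [a] else [a, b]).any (fun n => ((stepB n).map g).getD false)) := by
  have hsplit : (PySem.List.enumerate PORT_NODE_PAIRS).any
      (fun x => ((stepA a b x).map g).getD false) =
      ((PySem.List.enumerate PORT_NODE_PAIRS).any (fun x => ((stepA1 a x).map g).getD false) ||
       (PySem.List.enumerate PORT_NODE_PAIRS).any (fun x => ((stepA1 b x).map g).getD false)) := by
    rw [← any_or_split]
    exact congrArg _ (funext fun x => stepA_split a b g x)
  rw [hsplit, single_node, single_node]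
  by_cases hab : a = b <;> simp [hab]

-- ===== VERDICT (by name: the statement is the Claim_ definition above) =====
theorem port_flags_for_pair_spec : Claim_equal_port_flags_for_pair := by
  intro board a b _
  unfold Spec_port_flags_for_pair
  rw [portA_eq_fold, portB_eq_fold]
  have hinit : initFlags = canon false false false false false false := by
    simp [canon, initFlags]
  rw [hinit, foldl_handle_canon, foldl_handle_canon]
  simp only [Bool.false_or]
  rw [any_pairs_eq, any_pairs_eq, any_pairs_eq, any_pairs_eq, any_pairs_eq, any_pairs_eq]
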